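-- pv_equiv track=rewrite | github.com/jinkyumpark/Algorithm-repo | 1_StrongPasswordChecker.py | repeatingChar
-- ===== SOURCE A (Python) =====
-- def repeatingChar(inStr: str) -> int:
--     repeat = 0
--     count = 0
--     while count < len(inStr)-2:
--         if inStr[count] == inStr[count+1] and inStr[count] == inStr[count+2]:
--             repeat += 1
--             count += 2
--         count += 1
--     return repeat
-- ===== SOURCE B (Python) =====
-- def repeatingChar(inStr: str) -> int:
--     # Run-length decomposition: each maximal run of n equal characters
--     # contributes n // 3 non-overlapping triples.
--     prev = None
--     run = 0
--     total = 0
--     for ch in inStr: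
--         if ch == prev:
--             run += 1
--         else:
--             total += run // 3
--             prev = ch
--             run = 1
--     return total + run // 3
-- ===== Notes on version B (the rewrite author's own statement) =====
-- stated objective: alternative
-- what changed: Replaces A's greedy three-character-window pointer (skipping ahead by 3 on each match) with a run-length decomposition: one pass accumulates maximal runs of equal characters and sums run_length // 3 per run.
import Mathlib
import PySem

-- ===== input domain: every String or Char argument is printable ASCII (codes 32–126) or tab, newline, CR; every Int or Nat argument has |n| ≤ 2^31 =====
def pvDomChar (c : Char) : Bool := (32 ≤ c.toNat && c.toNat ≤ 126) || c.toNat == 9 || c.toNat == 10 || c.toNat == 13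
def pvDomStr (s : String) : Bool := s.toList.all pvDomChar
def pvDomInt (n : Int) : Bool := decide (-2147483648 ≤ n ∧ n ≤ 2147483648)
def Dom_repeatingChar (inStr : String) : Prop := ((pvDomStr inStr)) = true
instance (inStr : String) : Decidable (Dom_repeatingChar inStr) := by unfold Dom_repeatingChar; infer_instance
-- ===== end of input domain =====

-- B replaces A's greedy three-character-window pointer with a single-pass
-- run-length accumulation summing run_length // 3 per maximal run (alternative
-- decomposition, same linear cost).

-- ===== PORT A =====
-- A's while-loop compares inStr[count], inStr[count+1], inStr[count+2] and on a
-- match adds 1 and advances by 3, else by 1; ported as the structural recursion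
-- over the same three-character window of the char list, with the same skip.
def aLoop : List Char → Int
  | a :: b :: c :: t => if a = b ∧ a = c then 1 + aLoop t else aLoop (b :: c :: t)
  | _ => 0
termination_by l => l.length
decreasing_by all_goals (simp; try omega)

def repeatingChar (inStr : String) : Int := aLoop inStr.toList

-- ===== PORT B =====
-- state: (prev, run, total) exactly as in Source B's loop
def bStep (st : Option Char × Nat × Nat) (ch : Char) : Option Char × Nat × Nat :=
  match st with
  | (prev, run, total) =>
    if some ch = prev then (prev, run + 1, total)
    else (some ch, 1, total + run / 3)

def bFinish (st : Option Char × Nat × Nat) : Nat :=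
  match st with
  | (_, run, total) => total + run / 3

def repeatingChar_alt (inStr : String) : Int :=
  (bFinish (inStr.toList.foldl bStep (none, 0, 0)) : Nat)

-- ===== PRECONDITION & SPEC =====
def Spec_repeatingChar (inStr : String) (out : Int) : Prop := out = repeatingChar_alt inStr
instance (inStr : String) (out : Int) : Decidable (Spec_repeatingChar inStr out) := by unfold Spec_repeatingChar; infer_instance

-- ===== CLAIM (what is proved, stated in full; the proofs are below) =====
def Claim_equal_repeatingChar : Prop := ∀ (inStr : String), Dom_repeatingChar inStr → Spec_repeatingChar inStr (repeatingChar inStr)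

-- ===== LEMMAS AND PROOFS =====

-- run lengths of the remaining input, given a current run of n copies of c
def runsAux (c : Char) (n : Nat) : List Char → List Nat
  | [] => [n]
  | x :: t => if x = c then runsAux c (n + 1) t else n :: runsAux x 1 t

def sumRuns (ns : List Nat) : Nat := (ns.map (· / 3)).sum

-- A's greedy scan over a run boundary: a leading run of n copies of c followed
-- by rest (whose head differs from c) yields n/3 triples plus the rest's count.
theorem aLoop_replicate (n : Nat) (c : Char) (rest : List Char)
    (h : ∀ y, rest.head? = some y → y ≠ c) :
    aLoop (List.replicate n c ++ rest) = (n / 3 : Nat) + aLoop rest := by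
  induction n using Nat.strong_induction_on with
  | _ n ih =>
    match n with
    | 0 => simp
    | 1 =>
      match rest with
      | [] => simp [aLoop]
      | [x] => simp [aLoop]
      | x :: y :: t =>
        have hx : c ≠ x := Ne.symm (h x rfl)
        simp [aLoop, hx]
    | 2 =>
      match rest with
      | [] => simp [aLoop, List.replicate]
      | [x] =>
        have hx : c ≠ x := Ne.symm (h x rfl)
        simp [aLoop, List.replicate, hx]
      | x :: y :: t =>
        have hx : c ≠ x := Ne.symm (h x rfl)
        simp [aLoop, List.replicate, hx]
    | (m + 3) =>
      have : List.replicate (m + 3) c ++ rest = c :: c :: c :: (List.replicate m c ++ rest) := by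
        simp [List.replicate]
      rw [this]
      have hrec := ih m (by omega) 
      rw [show aLoop (c :: c :: c :: (List.replicate m c ++ rest)) =
            1 + aLoop (List.replicate m c ++ rest) by simp [aLoop]]
      rw [hrec]
      have hdiv : (m + 3) / 3 = m / 3 + 1 := by omega
      rw [hdiv]
      push_cast
      ring

theorem aLoop_runs (t : List Char) : ∀ (c : Char) (n : Nat),
    aLoop (List.replicate n c ++ t) = (sumRuns (runsAux c n t) : Nat) := by
  induction t with
  | nil =>
    intro c n
    rw [aLoop_replicate n c [] (by simp)]
    simp [runsAux, sumRuns, aLoop]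
  | cons x t ih =>
    intro c n
    by_cases hx : x = c
    · subst hx
      have : List.replicate n x ++ x :: t = List.replicate (n + 1) x ++ t := by
        rw [List.replicate_succ']; simp
      rw [this, ih x (n + 1)]
      simp [runsAux]
    · rw [aLoop_replicate n c (x :: t) (by intro y hy; simp at hy; subst hy; exact hx)]
      have : (x :: t) = List.replicate 1 x ++ t := by simp
      rw [this, ih x 1]
      simp [runsAux, hx, sumRuns]

theorem bFold_runs (t : List Char) : ∀ (c : Char) (n total : Nat),
    bFinish (t.foldl bStep (some c, n, total)) = total + sumRuns (runsAux c n t) := by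
  induction t with
  | nil => intro c n total; simp [bFinish, runsAux, sumRuns]
  | cons x t ih =>
    intro c n total
    by_cases hx : x = c
    · subst hx
      simp [List.foldl_cons, bStep, ih, runsAux]
    · have hx' : ¬ (some x = some c) := by simp [hx]
      simp [List.foldl_cons, bStep, hx', ih, runsAux, hx, sumRuns]
      omega

-- ===== VERDICT (by name: the statement is the Claim_ definition above) =====
theorem repeatingChar_spec : Claim_equal_repeatingChar := by
  intro inStr _
  unfold Spec_repeatingChar repeatingChar repeatingChar_alt
  cases hs : inStr.toList with
  | nil => simp [aLoop, bFinish]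
  | cons x t =>
    have ha : aLoop (x :: t) = (sumRuns (runsAux x 1 t) : Nat) := by
      have := aLoop_runs t x 1
      simpa using this
    have hb : bFinish ((x :: t).foldl bStep (none, 0, 0)) = sumRuns (runsAux x 1 t) := by
      have hstep : bStep (none, 0, 0) x = (some x, 1, 0) := by simp [bStep]
      rw [List.foldl_cons, hstep, bFold_runs t x 1 0, Nat.zero_add]
    rw [ha, hb]
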